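-- pv_equiv track=rewrite | github.com/Pabitramaiti/PFG-DPM | glue/reporting_checks.py | _group_data_by_fund_and_type_enhanced
-- ===== SOURCE A (Python) =====
-- from typing import Dict, List, Any, Optional
--
-- def _group_data_by_fund_and_type_enhanced(data: List[Dict]) -> Dict[str, Dict[str, List[Dict]]]:
--      """Enhanced grouping by CUSTOM_FUND_CODE and CUSTOM_CHECK_TYPE1 for Redemption_SWP report"""
--      grouped_data = {}
--
--      for record in data:
--               fund_code = record.get('CUSTOM_FUND_CODE', '')
--               check_type1 = record.get('CUSTOM_CHECK_TYPE1', '')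
--
--               # Use CUSTOM_CHECK_TYPE1 for grouping (RED or SWP)
--               if check_type1 == 'RED':
--                    type_key = 'RED'
--               elif check_type1 == 'SWP':
--                    type_key = 'SWP'
--               else:
--                    type_key = 'OTHER'
--
--               if fund_code not in grouped_data:
--                    grouped_data[fund_code] = {}
--
--               if type_key not in grouped_data[fund_code]:
--                    grouped_data[fund_code][type_key] = []
--
--               grouped_data[fund_code][type_key].append(record)
--
--      return grouped_data
-- ===== SOURCE B (Python) =====
-- def _group_data_by_fund_and_type_enhanced(data):
--     """Group by distinct fund codes (first-appearance order), then by distinct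
--     check-type keys within each fund, via ordered dedup + filtering passes."""
--     def fund(r):
--         return r.get('CUSTOM_FUND_CODE', '')
--
--     def tkey(r):
--         t = r.get('CUSTOM_CHECK_TYPE1', '')
--         return t if t in ('RED', 'SWP') else 'OTHER'
--
--     out = {}
--     for f in dict.fromkeys(fund(r) for r in data):
--         rs = [r for r in data if fund(r) == f]
--         out[f] = {t: [r for r in rs if tkey(r) == t]
--                   for t in dict.fromkeys(tkey(r) for r in rs)}
--     return out
-- ===== Notes on version B (the rewrite author's own statement) =====
-- stated objective: alternative
-- what changed: A builds the nested dict incrementally, hashing each record into per-fund/per-type buckets with membership checks; B instead computes the ordered-dedup list of fund codes, and for each fund filters the records and groups them by their deduped type keys with comprehensions.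
import Mathlib
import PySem

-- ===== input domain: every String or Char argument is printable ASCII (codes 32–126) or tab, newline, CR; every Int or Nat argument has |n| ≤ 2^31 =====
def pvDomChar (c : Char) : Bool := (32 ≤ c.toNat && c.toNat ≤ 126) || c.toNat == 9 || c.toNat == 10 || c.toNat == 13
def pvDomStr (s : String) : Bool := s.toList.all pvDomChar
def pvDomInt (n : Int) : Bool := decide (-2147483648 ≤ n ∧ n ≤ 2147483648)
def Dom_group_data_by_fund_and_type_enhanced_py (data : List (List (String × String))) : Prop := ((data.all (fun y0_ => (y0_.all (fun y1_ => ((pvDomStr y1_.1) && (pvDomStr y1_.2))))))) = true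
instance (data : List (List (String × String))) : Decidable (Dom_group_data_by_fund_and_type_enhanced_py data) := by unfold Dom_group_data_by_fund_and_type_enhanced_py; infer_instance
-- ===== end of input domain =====

-- B groups by the ordered-dedup list of fund codes, then the ordered-dedup type keys within
-- each fund, with filtering passes — an alternative decomposition of A's incremental build.

-- ===== PORT A =====
-- loop body of A: hash `record` into grouped_data[fund_code][type_key]
def pvStepA (grouped : PySem.Dict String (PySem.Dict String (List (List (String × String)))))
    (record : List (String × String)) :
    PySem.Dict String (PySem.Dict String (List (List (String × String)))) :=
  let fund_code := (PySem.Dict.mk record).getD "CUSTOM_FUND_CODE" ""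
  let check_type1 := (PySem.Dict.mk record).getD "CUSTOM_CHECK_TYPE1" ""
  let type_key := if check_type1 = "RED" then "RED"
                  else if check_type1 = "SWP" then "SWP"
                  else "OTHER"
  let g1 := if grouped.contains fund_code then grouped
            else grouped.insert fund_code PySem.Dict.empty
  let inner := g1.getD fund_code PySem.Dict.empty
  let inner1 := if inner.contains type_key then inner else inner.insert type_key []
  g1.insert fund_code (inner1.insert type_key (inner1.getD type_key [] ++ [record]))

def group_data_by_fund_and_type_enhanced_py (data : List (List (String × String))) :
    List (String × List (String × List (List (String × String)))) :=
  ((data.foldl pvStepA PySem.Dict.empty).items).map (fun p => (p.1, p.2.items))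

-- ===== PORT B =====
def pvFund (r : List (String × String)) : String :=
  (PySem.Dict.mk r).getD "CUSTOM_FUND_CODE" ""

def pvTkey (r : List (String × String)) : String :=
  let t := (PySem.Dict.mk r).getD "CUSTOM_CHECK_TYPE1" ""
  if t = "RED" ∨ t = "SWP" then t else "OTHER"

def group_data_by_fund_and_type_enhanced_py_alt (data : List (List (String × String))) :
    List (String × List (String × List (List (String × String)))) :=
  let out := (PySem.List.dedup (data.map pvFund)).foldl (fun out f =>
      let rs := data.filter (fun r => pvFund r == f)
      out.insert f ((PySem.List.dedup (rs.map pvTkey)).foldl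
        (fun inner t => inner.insert t (rs.filter (fun r => pvTkey r == t)))
        PySem.Dict.empty)) PySem.Dict.empty
  out.items.map (fun p => (p.1, p.2.items))

-- ===== PRECONDITION & SPEC =====
def Spec_group_data_by_fund_and_type_enhanced_py (data : List (List (String × String))) (out : List (String × List (String × List (List (String × String))))) : Prop := out = group_data_by_fund_and_type_enhanced_py_alt data
instance (data : List (List (String × String))) (out : List (String × List (String × List (List (String × String))))) : Decidable (Spec_group_data_by_fund_and_type_enhanced_py data out) := by
  unfold Spec_group_data_by_fund_and_type_enhanced_py
  letI h : DecidableEq (List (String × List (List (String × String)))) := inferInstance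
  letI h2 : DecidableEq (String × List (String × List (List (String × String)))) :=
    fun a b => instDecidableEqProd a b
  infer_instance

-- ===== CLAIM (what is proved, stated in full; the proofs are below) =====
def Claim_equal_group_data_by_fund_and_type_enhanced_py : Prop := ∀ (data : List (List (String × String))), Dom_group_data_by_fund_and_type_enhanced_py data → Spec_group_data_by_fund_and_type_enhanced_py data (group_data_by_fund_and_type_enhanced_py data)

-- ===== LEMMAS AND PROOFS =====

-- per-record action on the inner (type_key) dict
def pvInnerStep (r : List (String × String))
    (i : PySem.Dict String (List (List (String × String)))) :
    PySem.Dict String (List (List (String × String))) :=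
  i.modify (pvTkey r) [] (fun l => l ++ [r])

-- A's loop body is a nested `modify`
theorem pvStepA_eq_modify (g : PySem.Dict String (PySem.Dict String (List (List (String × String)))))
    (r : List (String × String)) :
    pvStepA g r = g.modify (pvFund r) PySem.Dict.empty (pvInnerStep r) := by
  simp only [pvStepA, pvInnerStep, pvFund, pvTkey, PySem.Dict.modify]
  have htk : (if (PySem.Dict.mk r).getD "CUSTOM_CHECK_TYPE1" "" = "RED" then "RED"
              else if (PySem.Dict.mk r).getD "CUSTOM_CHECK_TYPE1" "" = "SWP" then "SWP"
              else "OTHER")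
            = (if (PySem.Dict.mk r).getD "CUSTOM_CHECK_TYPE1" "" = "RED"
                  ∨ (PySem.Dict.mk r).getD "CUSTOM_CHECK_TYPE1" "" = "SWP"
               then (PySem.Dict.mk r).getD "CUSTOM_CHECK_TYPE1" "" else "OTHER") := by
    split_ifs <;> simp_all
  rw [htk]
  set f := (PySem.Dict.mk r).getD "CUSTOM_FUND_CODE" "" with hf
  set t := (if (PySem.Dict.mk r).getD "CUSTOM_CHECK_TYPE1" "" = "RED"
              ∨ (PySem.Dict.mk r).getD "CUSTOM_CHECK_TYPE1" "" = "SWP"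
            then (PySem.Dict.mk r).getD "CUSTOM_CHECK_TYPE1" "" else "OTHER") with ht
  by_cases hcf : g.contains f
  · simp only [hcf, if_true]
    by_cases hct : (g.getD f PySem.Dict.empty).contains t
    · simp [hct]
    · simp [hct, PySem.Dict.getD_insert_self, PySem.Dict.insert_insert_self,
        PySem.Dict.getD_of_not_contains _ _ (by simpa using hct)]
  · have hcf' : g.contains f = false := by simpa using hcf
    simp [hcf', PySem.Dict.getD_insert_self, PySem.Dict.getD_of_not_contains g PySem.Dict.empty hcf',
      PySem.Dict.contains_empty, PySem.Dict.getD_empty, PySem.Dict.insert_insert_self]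

-- getD through a key-indexed modify fold = fold of the per-key action over the matching records
theorem pv_getD_foldl_modify_key {ν : Type} (l : List (List (String × String)))
    (key : List (String × String) → String) (F : List (String × String) → ν → ν)
    (d0 : ν) (d : PySem.Dict String ν) (c : String) :
    (l.foldl (fun g r => g.modify (key r) d0 (F r)) d).getD c d0
      = (l.filter (fun r => key r == c)).foldl (fun v r => F r v) (d.getD c d0) := by
  induction l generalizing d with
  | nil => rfl
  | cons r l ih =>
    simp only [List.foldl_cons, List.filter_cons]
    by_cases h : key r = c
    · simp only [h, beq_self_eq_true, if_true, List.foldl_cons, ih]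
      rw [PySem.Dict.getD_modify]
      simp
    · have hb : (key r == c) = false := by simpa using h
      simp only [hb, Bool.false_eq_true, if_false, ih]
      rw [PySem.Dict.getD_modify]
      simp [Ne.symm h]

theorem pv_spec_aux (data : List (List (String × String))) :
    group_data_by_fund_and_type_enhanced_py data
      = group_data_by_fund_and_type_enhanced_py_alt data := by
  have hstep : pvStepA = fun g r => g.modify (pvFund r) PySem.Dict.empty (pvInnerStep r) :=
    funext fun g => funext fun r => pvStepA_eq_modify g r
  simp only [group_data_by_fund_and_type_enhanced_py, group_data_by_fund_and_type_enhanced_py_alt]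
  rw [hstep]
  -- B's outer dict appends its fresh distinct keys in order
  have hBouter := PySem.Dict.items_foldl_insert_fresh
    (l := PySem.List.dedup (data.map pvFund)) (k := fun f => f)
    (v := fun f => (PySem.List.dedup (((data.filter (fun r => pvFund r == f)).map pvTkey))).foldl
        (fun inner t => inner.insert t ((data.filter (fun r => pvFund r == f)).filter (fun r => pvTkey r == t)))
        PySem.Dict.empty)
    (d := PySem.Dict.empty)
    (by intro a _; exact PySem.Dict.contains_empty a)
    (by simpa using PySem.Set.nodup_ofList (data.map pvFund))
  simp only at hBouter
  rw [hBouter]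
  -- A's outer dict: keys and nodup
  have hknd : (data.foldl (fun g r => g.modify (pvFund r) PySem.Dict.empty (pvInnerStep r))
      PySem.Dict.empty).keys.Nodup :=
    PySem.Dict.nodup_keys_foldl_modify_key data pvFund PySem.Dict.empty
      (fun _ r => pvInnerStep r) PySem.Dict.empty List.nodup_nil
  have hkeys : (data.foldl (fun g r => g.modify (pvFund r) PySem.Dict.empty (pvInnerStep r))
      PySem.Dict.empty).keys = PySem.List.dedup (data.map pvFund) := by
    have h := PySem.Dict.keys_foldl_modify_key data pvFund PySem.Dict.empty
      (fun _ r => pvInnerStep r) PySem.Dict.empty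
    simpa using h
  rw [PySem.Dict.items_eq_map_keys _ hknd PySem.Dict.empty, hkeys]
  simp only [List.map_map,
    show (PySem.Dict.empty : PySem.Dict String (PySem.Dict String (List (List (String × String))))).items = [] from rfl,
    List.nil_append]
  apply List.map_congr_left
  intro f hf
  simp only [Function.comp_apply]
  refine Prod.ext rfl ?_
  -- A's inner dict at fund f
  have hgetD : (data.foldl (fun g r => g.modify (pvFund r) PySem.Dict.empty (pvInnerStep r))
      PySem.Dict.empty).getD f PySem.Dict.empty
      = (data.filter (fun r => pvFund r == f)).foldl (fun i r => pvInnerStep r i)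
          PySem.Dict.empty := by
    have h := pv_getD_foldl_modify_key data pvFund (fun r i => pvInnerStep r i)
      PySem.Dict.empty PySem.Dict.empty f
    simpa using h
  rw [hgetD]
  -- both inner dicts have the same items
  have hiknd : ((data.filter (fun r => pvFund r == f)).foldl (fun i r => pvInnerStep r i)
      PySem.Dict.empty).keys.Nodup := by
    have h := PySem.Dict.nodup_keys_foldl_modify_key (data.filter (fun r => pvFund r == f))
      pvTkey [] (fun _ r => fun l => l ++ [r]) PySem.Dict.empty List.nodup_nil
    simpa [pvInnerStep] using h
  have hikeys : ((data.filter (fun r => pvFund r == f)).foldl (fun i r => pvInnerStep r i)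
      PySem.Dict.empty).keys = PySem.List.dedup ((data.filter (fun r => pvFund r == f)).map pvTkey) := by
    have h := PySem.Dict.keys_foldl_modify_key (data.filter (fun r => pvFund r == f))
      pvTkey [] (fun _ r => fun l => l ++ [r]) PySem.Dict.empty
    simpa [pvInnerStep] using h
  rw [PySem.Dict.items_eq_map_keys _ hiknd [], hikeys]
  have hBinner := PySem.Dict.items_foldl_insert_fresh
    (l := PySem.List.dedup (((data.filter (fun r => pvFund r == f)).map pvTkey)))
    (k := fun t => t)
    (v := fun t => (data.filter (fun r => pvFund r == f)).filter (fun r => pvTkey r == t))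
    (d := PySem.Dict.empty)
    (by intro a _; exact PySem.Dict.contains_empty a)
    (by simpa using PySem.Set.nodup_ofList ((data.filter (fun r => pvFund r == f)).map pvTkey))
  simp only at hBinner
  rw [hBinner]
  simp only [show (PySem.Dict.empty : PySem.Dict String (List (List (String × String)))).items = [] from rfl,
    List.nil_append]
  apply List.map_congr_left
  intro t ht
  refine Prod.ext rfl ?_
  have h := pv_getD_foldl_modify_key (data.filter (fun r => pvFund r == f)) pvTkey
    (fun r l => l ++ [r]) [] PySem.Dict.empty t
  rw [PySem.Dict.getD_empty, PySem.List.foldl_append_singleton, List.nil_append] at h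
  simp only [pvInnerStep]
  exact h

-- ===== VERDICT (by name: the statement is the Claim_ definition above) =====
theorem group_data_by_fund_and_type_enhanced_py_spec : Claim_equal_group_data_by_fund_and_type_enhanced_py := by
  intro data _
  unfold Spec_group_data_by_fund_and_type_enhanced_py
  exact pv_spec_aux data
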